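-- pv_equiv track=rewrite | github.com/pypi-data/pypi-mirror-386 | packages/fastapi-qengine/fastapi_qengine-0.7.0.tar.gz/fastapi_qengine-0.7.0/fastapi_qengine/core/parser.py | _parse_nested_key
-- ===== SOURCE A (Python) =====
-- def _parse_nested_key(key: str) -> list[str]:
--     """
--     Parse a nested key like 'filter[where][price][$gt]' into parts.
--
--     Returns:
--         List of key parts like ['filter', 'where', 'price', '$gt']
--     """
--     parts: list[str] = []
--     current = ""
--
--     for char in key:
--         if char in ["[", "]"]:
--             if current:
--                 parts.append(current)
--                 current = ""
--         else:
--             current += char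
--
--     if current:
--         parts.append(current)
--
--     return parts
-- ===== SOURCE B (Python) =====
-- import re
--
-- def _parse_nested_key(key: str) -> list[str]:
--     """Parse 'filter[where][price][$gt]' into ['filter','where','price','$gt'].
--
--     Each part is a maximal run of non-bracket characters; '+' skips empties.
--     """
--     return re.findall(r'[^\[\]]+', key)
-- ===== Notes on version B (the rewrite author's own statement) =====
-- stated objective: idiomatic
-- what changed: Replaced the character-by-character accumulator state machine with a single regex findall of maximal non-bracket runs, which directly yields the non-empty parts.
import Mathlib
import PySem

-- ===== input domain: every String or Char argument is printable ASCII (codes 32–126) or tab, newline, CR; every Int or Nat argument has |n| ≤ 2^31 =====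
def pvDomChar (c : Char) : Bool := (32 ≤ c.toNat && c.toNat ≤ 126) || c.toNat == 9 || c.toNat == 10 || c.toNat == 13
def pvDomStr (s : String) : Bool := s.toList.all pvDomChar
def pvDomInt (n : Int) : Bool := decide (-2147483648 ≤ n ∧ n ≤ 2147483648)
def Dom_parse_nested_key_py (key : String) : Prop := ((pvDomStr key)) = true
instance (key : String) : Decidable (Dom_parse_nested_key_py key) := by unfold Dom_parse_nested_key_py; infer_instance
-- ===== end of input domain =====

-- B replaces A's char-by-char accumulator state machine with a regex findall of
-- maximal non-bracket runs (more idiomatic; same O(n) cost).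


-- ===== PORT A =====
-- current : str is carried as its List Char; appended with String.mk at flush time
def pvParseAux : List Char → List String → List Char → List String
  | [], parts, current => if current ≠ [] then parts ++ [String.mk current] else parts
  | c :: cs, parts, current =>
    if c = '[' ∨ c = ']' then
      pvParseAux cs (if current ≠ [] then parts ++ [String.mk current] else parts) []
    else
      pvParseAux cs parts (current ++ [c])

def parse_nested_key_py (key : String) : List String :=
  pvParseAux key.toList [] []

-- ===== PORT B =====
-- re.findall(r'[^\[\]]+', key): maximal runs of non-bracket characters
def pvNotBracket (c : Char) : Bool := c ≠ '[' && c ≠ ']'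

def pvRuns : List Char → List (List Char)
  | [] => []
  | c :: cs =>
    if pvNotBracket c then
      (c :: cs.takeWhile pvNotBracket) :: pvRuns (cs.dropWhile pvNotBracket)
    else pvRuns cs
termination_by l => l.length
decreasing_by
  · exact Nat.lt_succ_of_le (List.length_dropWhile_le _ _)
  · simp

def parse_nested_key_py_alt (key : String) : List String :=
  (pvRuns key.toList).map String.mk

-- ===== PRECONDITION & SPEC =====
def Spec_parse_nested_key_py (key : String) (out : List String) : Prop := out = parse_nested_key_py_alt key
instance (key : String) (out : List String) : Decidable (Spec_parse_nested_key_py key out) := by unfold Spec_parse_nested_key_py; infer_instance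

-- ===== CLAIM (what is proved, stated in full; the proofs are below) =====
def Claim_equal_parse_nested_key_py : Prop := ∀ (key : String), Dom_parse_nested_key_py key → Spec_parse_nested_key_py key (parse_nested_key_py key)

-- ===== LEMMAS AND PROOFS =====

lemma pvTakeDrop (rest : List Char) (c : Char) (cs : List Char)
    (h : ∀ d ∈ rest, pvNotBracket d = true) (hc : pvNotBracket c = false) :
    (rest ++ c :: cs).takeWhile pvNotBracket = rest ∧
    (rest ++ c :: cs).dropWhile pvNotBracket = c :: cs := by
  induction rest with
  | nil => simp [List.takeWhile, List.dropWhile, hc]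
  | cons d rest ih =>
    have hd := h d (by simp)
    have := ih (fun e he => h e (by simp [he]))
    simp [List.takeWhile, List.dropWhile, hd, this.1, this.2]

lemma pvRuns_all (l : List Char) (h : ∀ d ∈ l, pvNotBracket d = true) :
    pvRuns l = if l = [] then [] else [l] := by
  cases l with
  | nil => simp [pvRuns]
  | cons c cs =>
    have hc := h c (by simp)
    have htk : cs.takeWhile pvNotBracket = cs :=
      List.takeWhile_eq_self_iff.mpr (fun e he => h e (by simp [he]))
    have hdw : cs.dropWhile pvNotBracket = [] :=
      List.dropWhile_eq_nil_iff.mpr (fun e he => h e (by simp [he]))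
    simp [pvRuns, hc, htk, hdw]

lemma pvRuns_append_bracket (cur : List Char) (c : Char) (cs : List Char)
    (h : ∀ d ∈ cur, pvNotBracket d = true) (hc : pvNotBracket c = false) :
    pvRuns (cur ++ c :: cs) = (if cur = [] then [] else [cur]) ++ pvRuns cs := by
  cases cur with
  | nil => simp [pvRuns, hc]
  | cons d rest =>
    have hd := h d (by simp)
    have hr := pvTakeDrop rest c cs (fun e he => h e (by simp [he])) hc
    simp [pvRuns, hd, hr.1, hr.2, hc]

lemma pvAux_eq (cs : List Char) : ∀ (parts : List String) (cur : List Char),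
    (∀ d ∈ cur, pvNotBracket d = true) →
    pvParseAux cs parts cur = parts ++ (pvRuns (cur ++ cs)).map String.mk := by
  induction cs with
  | nil =>
    intro parts cur h
    rw [List.append_nil, pvRuns_all cur h]
    by_cases hcur : cur = [] <;> simp [pvParseAux, hcur]
  | cons c cs ih =>
    intro parts cur h
    by_cases hc : c = '[' ∨ c = ']'
    · have hcb : pvNotBracket c = false := by
        rcases hc with rfl | rfl <;> simp [pvNotBracket]
      rw [pvRuns_append_bracket cur c cs h hcb]
      have := ih (if cur ≠ [] then parts ++ [String.mk cur] else parts) []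
        (by intro d hd; simp at hd)
      simp only [pvParseAux, hc, if_true] at *
      rw [this]
      by_cases hcur : cur = [] <;> simp [hcur]
    · have hcb : pvNotBracket c = true := by
        simp [pvNotBracket]; exact ⟨fun h1 => hc (Or.inl h1), fun h2 => hc (Or.inr h2)⟩
      have hext : ∀ d ∈ cur ++ [c], pvNotBracket d = true := by
        intro d hd
        rcases List.mem_append.mp hd with h1 | h2
        · exact h d h1
        · simp at h2; subst h2; exact hcb
      have := ih parts (cur ++ [c]) hext
      simp only [pvParseAux, hc, if_false]
      rw [this, List.append_assoc]
      simp

-- ===== VERDICT (by name: the statement is the Claim_ definition above) =====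
theorem parse_nested_key_py_spec : Claim_equal_parse_nested_key_py := by
  intro key _
  show parse_nested_key_py key = parse_nested_key_py_alt key
  unfold parse_nested_key_py parse_nested_key_py_alt
  rw [pvAux_eq key.toList [] [] (by intro d hd; simp at hd)]
  simp
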